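-- pv_equiv track=rewrite | github.com/AsishPro/Coding | 3rd year/sup.py | find
-- ===== SOURCE A (Python) =====
-- def find(i,l,num):
--     if i>=len(num):
--         return 0
--     digit = list(map(int,str(num[i])))
--     if any(item in l for item in digit):
--         l+=digit
--         l=list(set(l))
--         return 1+find(i+1,l,num)
--     return find(i+1,l,num)
-- ===== SOURCE B (Python) =====
-- def find(i, l, num):
--     seen = set(l)
--     count = 0
--     for j in range(i, len(num)):
--         digits = {int(c) for c in str(num[j])}
--         if digits & seen:
--             seen |= digits
--             count += 1
--     return count
-- ===== Notes on version B (the rewrite author's own statement) =====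
-- stated objective: idiomatic
-- what changed: Replaced the linear recursion that threads a deduplicated list (l += digit; l = list(set(l))) with a single for-loop over range(i, len(num)) that keeps a count and a growing set of seen digits, testing overlap with set intersection.
import Mathlib
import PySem

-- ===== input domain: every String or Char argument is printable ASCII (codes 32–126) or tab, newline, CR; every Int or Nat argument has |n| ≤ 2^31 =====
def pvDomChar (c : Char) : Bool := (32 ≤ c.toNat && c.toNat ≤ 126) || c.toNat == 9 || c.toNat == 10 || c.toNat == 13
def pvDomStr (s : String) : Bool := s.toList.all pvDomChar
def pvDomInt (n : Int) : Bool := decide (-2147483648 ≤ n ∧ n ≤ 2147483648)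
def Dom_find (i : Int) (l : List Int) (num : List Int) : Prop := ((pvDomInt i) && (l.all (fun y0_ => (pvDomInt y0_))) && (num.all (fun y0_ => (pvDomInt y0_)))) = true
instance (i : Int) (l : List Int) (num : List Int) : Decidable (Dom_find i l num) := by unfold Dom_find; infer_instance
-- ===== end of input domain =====

-- B replaces A's recursion (which threads a deduplicated list) by one loop with a count and a set;
-- equivalence is about the RETURN value only: Python A extends the caller's list in place on the
-- first matching element, B leaves its arguments untouched.

-- ===== PORT A =====
-- list(map(int, str(n))) — shared digit helper; int(c) = PySem.Int.ofChars? [c] (none = ValueError,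
-- e.g. on the '-' of a negative number)
def intDigits? (n : Int) : Option (List Int) :=
  (PySem.Int.toChars n).mapM (fun c => PySem.Int.ofChars? [c])

-- literal transliteration of A; on the inputs where Python raises (IndexError / ValueError,
-- excluded by Pre_find) the port returns 0.  l = list(set(l + digit)) is PySem.Set.ofList (l ++ digit):
-- only membership in l is ever used afterwards, so Python's hash order of list(set(..)) is irrelevant.
def find (i : Int) (l : List Int) (num : List Int) : Int :=
  if h : (num.length : Int) ≤ i then 0
  else
    match PySem.List.pyGet? num i with
    | none => 0
    | some n =>
      match intDigits? n with
      | none => 0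
      | some digit =>
        if digit.any (fun d => l.contains d) then
          1 + find (i + 1) (PySem.Set.ofList (l ++ digit)) num
        else
          find (i + 1) l num
termination_by ((num.length : Int) - i).toNat
decreasing_by all_goals omega

-- ===== PORT B =====
-- the body of Source B's for-loop, on state (seen, count); on inputs where Python raises (outside
-- Pre_find) it leaves the state unchanged
def findStep (num : List Int) (st : PySem.Set Int × Int) (j : Int) : PySem.Set Int × Int :=
  match PySem.List.pyGet? num j with
  | none => st
  | some n =>
    match intDigits? n with
    | none => st
    | some ds =>
      let digits : PySem.Set Int := PySem.Set.ofList ds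
      if PySem.Set.inter digits st.1 ≠ [] then (PySem.Set.union st.1 digits, st.2 + 1) else st

def find_alt (i : Int) (l : List Int) (num : List Int) : Int :=
  ((PySem.List.pyRange i (num.length : Int) 1).foldl (findStep num) (PySem.Set.ofList l, 0)).2

-- ===== PRECONDITION & SPEC =====
-- Pre_find excludes exactly the inputs where Python A raises: an IndexError when i < -len(num),
-- and a ValueError (int('-')) when some accessed element of num is negative.
def Pre_find (i : Int) (l : List Int) (num : List Int) : Prop :=
  ((num.length : Int) ≤ i) ∨
  (0 ≤ i ∧ ∀ x ∈ num.drop i.toNat, 0 ≤ x) ∨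
  (-(num.length : Int) ≤ i ∧ i < 0 ∧ ∀ x ∈ num, 0 ≤ x)
instance (i : Int) (l : List Int) (num : List Int) : Decidable (Pre_find i l num) := by
  unfold Pre_find; infer_instance

def pvWitness_find : Int × List Int × List Int := (0, [1], [12, 3])

def Spec_find (i : Int) (l : List Int) (num : List Int) (out : Int) : Prop := out = find_alt i l num
instance (i : Int) (l : List Int) (num : List Int) (out : Int) : Decidable (Spec_find i l num out) := by unfold Spec_find; infer_instance

-- ===== CLAIM (what is proved, stated in full; the proofs are below) =====
def Claim_equal_find : Prop := ∀ (i : Int) (l : List Int) (num : List Int), Dom_find i l num → Pre_find i l num → Spec_find i l num (find i l num)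

-- ===== LEMMAS AND PROOFS =====

lemma digitChar_mem_digits (d : Nat) (h : d < 10) :
    Nat.digitChar d ∈ ['0','1','2','3','4','5','6','7','8','9'] := by
  interval_cases d <;> decide

lemma toDigitsCore_mem (f : Nat) : ∀ (m : Nat) (acc : List Char),
    (∀ c ∈ acc, c ∈ ['0','1','2','3','4','5','6','7','8','9']) →
    ∀ c ∈ Nat.toDigitsCore 10 f m acc, c ∈ ['0','1','2','3','4','5','6','7','8','9'] := by
  induction f with
  | zero => intro m acc hacc; simpa [Nat.toDigitsCore] using hacc
  | succ f ih =>
    intro m acc hacc c hc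
    have hmod : m % 10 < 10 := Nat.mod_lt _ (by norm_num)
    simp only [Nat.toDigitsCore] at hc
    split at hc
    · rcases List.mem_cons.mp hc with h | h
      · exact h ▸ digitChar_mem_digits _ hmod
      · exact hacc _ h
    · refine ih _ _ ?_ _ hc
      intro c' hc'
      rcases List.mem_cons.mp hc' with h | h
      · exact h ▸ digitChar_mem_digits _ hmod
      · exact hacc _ h

lemma ofChars?_digit_isSome (c : Char) (h : c ∈ ['0','1','2','3','4','5','6','7','8','9']) :
    (PySem.Int.ofChars? [c]).isSome := by
  fin_cases h <;> decide

lemma mapM_isSome {α β : Type} (f : α → Option β) :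
    ∀ cs : List α, (∀ c ∈ cs, (f c).isSome) → (cs.mapM f).isSome := by
  intro cs
  induction cs with
  | nil => intro _; simp
  | cons c cs ih =>
    intro h
    obtain ⟨b, hb⟩ := Option.isSome_iff_exists.mp (h c (List.mem_cons_self ..))
    obtain ⟨bs, hbs⟩ := Option.isSome_iff_exists.mp (ih (fun x hx => h x (List.mem_cons_of_mem _ hx)))
    simp [List.mapM_cons, hb, hbs]

lemma intDigits?_isSome (n : Int) (h : 0 ≤ n) : (intDigits? n).isSome := by
  unfold intDigits?
  apply mapM_isSome
  intro c hc
  apply ofChars?_digit_isSome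
  unfold PySem.Int.toChars at hc
  rw [if_neg (by omega)] at hc
  exact toDigitsCore_mem _ _ _ (by simp) _ hc

-- Python's truthiness of `digits & seen`
lemma inter_ne_nil_iff (ds seen : List Int) :
    (PySem.Set.inter (PySem.Set.ofList ds) seen ≠ []) ↔ ∃ d ∈ ds, d ∈ seen := by
  rw [ne_eq, List.eq_nil_iff_forall_not_mem]
  push_neg
  constructor
  · rintro ⟨d, hd⟩
    rw [PySem.Set.mem_inter, PySem.Set.mem_ofList] at hd
    exact ⟨d, hd.1, hd.2⟩
  · rintro ⟨d, h1, h2⟩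
    exact ⟨d, by rw [PySem.Set.mem_inter, PySem.Set.mem_ofList]; exact ⟨h1, h2⟩⟩

-- the loop invariant: B's fold from (seen, c) computes c + A's recursion, for any seen with the
-- same members as A's current l
lemma mainLoop (num : List Int) : ∀ (k : Nat) (i : Int) (l seen : List Int) (c : Int),
    (((num.length : Int) - i).toNat = k) →
    (∀ x : Int, x ∈ l ↔ x ∈ seen) →
    (∀ j : Int, i ≤ j → j < (num.length : Int) →
        ∃ n, PySem.List.pyGet? num j = some n ∧ 0 ≤ n) →
    c + find i l num = ((PySem.List.pyRange i (num.length : Int) 1).foldl (findStep num) (seen, c)).2 := by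
  intro k
  induction k with
  | zero =>
    intro i l seen c hk _hm _hacc
    have hle : (num.length : Int) ≤ i := by omega
    rw [PySem.List.pyRange_one_eq_nil hle]
    simp [find, hle]
  | succ k ih =>
    intro i l seen c hk hm hacc
    have hlt : i < (num.length : Int) := by omega
    obtain ⟨n, hget, hn⟩ := hacc i le_rfl hlt
    obtain ⟨ds, hds⟩ := Option.isSome_iff_exists.mp (intDigits?_isSome n hn)
    rw [PySem.List.pyRange_one_cons hlt, List.foldl_cons]
    have hacc' : ∀ j : Int, i + 1 ≤ j → j < (num.length : Int) →
        ∃ n, PySem.List.pyGet? num j = some n ∧ 0 ≤ n :=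
      fun j hj hjl => hacc j (by omega) hjl
    have hk' : (((num.length : Int) - (i + 1)).toNat = k) := by omega
    by_cases hcond : ∃ d ∈ ds, d ∈ l
    · -- matching step: A counts 1 and rebuilds l; B increments c and grows seen
      have hcondA : ds.any (fun d => l.contains d) = true := by
        rcases hcond with ⟨d, h1, h2⟩
        exact List.any_eq_true.mpr ⟨d, h1, by simpa using h2⟩
      have hcondB : PySem.Set.inter (PySem.Set.ofList ds) seen ≠ [] := by
        rw [inter_ne_nil_iff]
        rcases hcond with ⟨d, h1, h2⟩
        exact ⟨d, h1, (hm d).mp h2⟩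
      have hA : find i l num = 1 + find (i + 1) (PySem.Set.ofList (l ++ ds)) num := by
        rw [find]
        rw [dif_neg (by omega)]
        simp only [hget, hds]
        rw [if_pos hcondA]
      have hB : findStep num (seen, c) i = (PySem.Set.union seen (PySem.Set.ofList ds), c + 1) := by
        simp only [findStep, hget, hds]
        rw [if_pos hcondB]
      have hm' : ∀ x : Int, x ∈ PySem.Set.ofList (l ++ ds) ↔
          x ∈ PySem.Set.union seen (PySem.Set.ofList ds) := by
        intro x
        rw [PySem.Set.mem_ofList, List.mem_append, PySem.Set.mem_union, PySem.Set.mem_ofList, hm x]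
      have := ih (i + 1) (PySem.Set.ofList (l ++ ds)) (PySem.Set.union seen (PySem.Set.ofList ds))
        (c + 1) hk' hm' hacc'
      rw [hA, hB, ← this]
      ring
    · -- non-matching step: both sides leave their state unchanged
      have hcondA : ds.any (fun d => l.contains d) = false := by
        rw [List.any_eq_false]
        intro d hd
        simp only [List.contains_eq_mem, decide_eq_true_eq]
        exact fun h2 => hcond ⟨d, hd, h2⟩
      have hcondB : ¬ PySem.Set.inter (PySem.Set.ofList ds) seen ≠ [] := by
        rw [inter_ne_nil_iff]
        rintro ⟨d, h1, h2⟩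
        exact hcond ⟨d, h1, (hm d).mpr h2⟩
      have hA : find i l num = find (i + 1) l num := by
        rw [find]
        rw [dif_neg (by omega)]
        simp only [hget, hds]
        rw [if_neg (by intro h; rw [hcondA] at h; simp at h)]
      have hB : findStep num (seen, c) i = (seen, c) := by
        simp only [findStep, hget, hds]
        rw [if_neg hcondB]
      rw [hA, hB]
      exact ih (i + 1) l seen c hk' hm hacc'

lemma pre_gives_access (i : Int) (l num : List Int) (hpre : Pre_find i l num) :
    ∀ j : Int, i ≤ j → j < (num.length : Int) →
      ∃ n, PySem.List.pyGet? num j = some n ∧ 0 ≤ n := by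
  intro j hij hjl
  rcases hpre with hle | ⟨hi0, hall⟩ | ⟨hlen, _hi, hall⟩
  · omega
  · have hj0 : (0 : Int) ≤ j := le_trans hi0 hij
    have hjn : j.toNat < num.length := by omega
    refine ⟨num[j.toNat], PySem.List.pyGet?_eq_some_getElem num hj0 (by omega), ?_⟩
    apply hall
    have hidx : i.toNat + (j.toNat - i.toNat) = j.toNat := by omega
    have hlt' : j.toNat - i.toNat < (num.drop i.toNat).length := by
      rw [List.length_drop]; omega
    have heq : (num.drop i.toNat)[j.toNat - i.toNat]'hlt' = num[j.toNat] := by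
      rw [List.getElem_drop]
      congr 1 <;> omega
    exact heq ▸ List.getElem_mem hlt'
  · have hin : PySem.List.pyGet? num j ≠ none := by
      intro hcontra
      rw [PySem.List.pyGet?_eq_none_iff] at hcontra
      exact hcontra ⟨by omega, by omega⟩
    obtain ⟨n, hn⟩ := Option.ne_none_iff_exists'.mp hin
    exact ⟨n, hn, hall n (PySem.List.mem_of_pyGet?_eq_some num hn)⟩

-- ===== VERDICT (by name: the statement is the Claim_ definition above) =====
theorem find_spec : Claim_equal_find := by
  intro i l num _hdom hpre
  unfold Spec_find find_alt
  have h := mainLoop num ((num.length : Int) - i).toNat i l (PySem.Set.ofList l) 0 rfl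
    (fun x => (PySem.Set.mem_ofList l x).symm) (pre_gives_access i l num hpre)
  omega
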